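-- pv_equiv track=rewrite | github.com/jgilles23/projectEuler | pe696_3.py | sub_tower
-- ===== SOURCE A (Python) =====
-- def fit_tower(tower, pair_allowed=True):
--     #Attempts to fit a pair, pungs, and chows in a tower orientation
--     #Base case
--     s = sum(tower)
--     if s == 0:
--         return True
--     if s%3 == 1:
--         return False
--     if s%3 == 2 and pair_allowed == False:
--         return False
--     #Iterate through the possibilities until a tower is found
--     for i in range(len(tower)):
--         if tower[i] == 0:
--             continue
--         #Fit a pair
--         if tower[i] >= 2 and sum(tower)%3 == 2:
--             #A pair is still required based on the sum
--             new_tower = tower[:i] + (tower[i]-2, ) + tower[i+1:]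
--             if fit_tower(new_tower):
--                 return True
--         #Fit a Chow
--         if tower[i] >= 3:
--             new_tower = tower[:i] + (tower[i]-3, ) + tower[i+1:]
--             if fit_tower(new_tower):
--                 return True
--         #Fit a Pung
--         if i <= len(tower) - 3 and tower[i] >= 1 and tower[i+1] >= 1 and tower[i+2] >= 1:
--             #Each space for the pung is greater than 1 and i will not exceed and break the script
--             new_tower = tower[:i] + (tower[i]-1, tower[i+1]-1, tower[i+2]-1) + tower[i+3:]
--             if fit_tower(new_tower):
--                 return True
--     #Did not find any solutions
--     return False
--
-- def iterate_sub_tower(tower, remaining, n=10**12):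
--     if remaining == 0:
--         return [tower]
--     if len(tower) >= n:
--         return []
--     ret = []
--     for j in range(1,min(remaining+1, 5)):
--         new_tower = tower + (j,)
--         ret += iterate_sub_tower(new_tower, remaining - j)
--     return ret
--
-- def sub_tower(total):
--     #Produces all possible "continuous" towers (aka not broken up by 0s) given a total for the sub_tower
--     if total%3 == 1:
--         return []
--     ret = []
--     if total%3 == 2:
--         #Pair is required to be in the subtotal
--         for t in range(2,total+1,3):
--             ret += iterate_sub_tower(tuple(),t)
--     #Iterate through the triples
--     for t in range(3,total+1,3):
--         ret += iterate_sub_tower(tuple(),t)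
--     #Determine which returns are acceptable
--     new_ret = {}
--     for r in ret:
--         if fit_tower(r):
--             if sum(r) in new_ret:
--                 new_ret[sum(r)].append(r)
--             else:
--                 new_ret[sum(r)] = [r]
--     return new_ret
-- ===== SOURCE B (Python) =====
-- def sub_tower(total):
--     # Same result as A: bottom-up table of compositions + globally memoized fit
--     # check, building the grouped dict per sum directly.
--     if total % 3 == 1:
--         return {}
--     # comps[t] = all compositions of t into parts 1..4, in lexicographic order
--     comps = [[()]]
--     for t in range(1, total + 1):
--         row = []
--         for j in range(1, min(t, 4) + 1):
--             row += [(j,) + c for c in comps[t - j]]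
--         comps.append(row)
--
--     def moves(tower, s):
--         ms = []
--         for i in range(len(tower)):
--             if tower[i] == 0:
--                 continue
--             if tower[i] >= 2 and s % 3 == 2:
--                 ms.append(tower[:i] + (tower[i] - 2,) + tower[i + 1:])
--             if tower[i] >= 3:
--                 ms.append(tower[:i] + (tower[i] - 3,) + tower[i + 1:])
--             if i <= len(tower) - 3 and tower[i] >= 1 and tower[i + 1] >= 1 and tower[i + 2] >= 1:
--                 ms.append(tower[:i] + (tower[i] - 1, tower[i + 1] - 1, tower[i + 2] - 1) + tower[i + 3:])
--         return ms
--
--     memo = {}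
--
--     def fit(tower):
--         r = memo.get(tower)
--         if r is not None:
--             return r
--         s = sum(tower)
--         if s == 0:
--             res = True
--         elif s % 3 == 1:
--             res = False
--         else:
--             res = any(fit(m) for m in moves(tower, s))
--         memo[tower] = res
--         return res
--
--     ts = []
--     if total % 3 == 2:
--         ts += range(2, total + 1, 3)
--     ts += range(3, total + 1, 3)
--     out = {}
--     for t in ts:
--         fits = [c for c in comps[t] if fit(c)]
--         if fits:
--             out[t] = fits
--     return out
-- ===== Notes on version B (the rewrite author's own statement) =====
-- stated objective: alternative
-- what changed: B memoizes the mahjong fit check in one dict shared across all towers (A re-runs a fresh backtracking search per tower) and replaces A's per-sum recursive enumeration plus dict regrouping by a bottom-up table of compositions consumed bucket by bucket in key order.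
import Mathlib
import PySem

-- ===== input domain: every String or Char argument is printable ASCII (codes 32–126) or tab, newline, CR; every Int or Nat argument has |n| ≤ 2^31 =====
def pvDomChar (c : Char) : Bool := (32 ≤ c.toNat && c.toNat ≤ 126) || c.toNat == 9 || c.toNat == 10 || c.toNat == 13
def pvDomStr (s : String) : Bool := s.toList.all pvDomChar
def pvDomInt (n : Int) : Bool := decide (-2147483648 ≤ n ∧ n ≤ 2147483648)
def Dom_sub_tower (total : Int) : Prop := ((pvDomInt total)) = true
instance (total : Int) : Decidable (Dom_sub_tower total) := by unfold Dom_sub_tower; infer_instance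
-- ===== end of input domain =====

-- B replaces A's per-tower backtracking fit check by one globally memoized one
-- and A's repeated recursive enumeration + dict regrouping by a bottom-up
-- composition table grouped per sum directly (objective: alternative).

-- ===== PORT A =====

-- termination measure for fit_tower's recursion: total number of stones
-- (each recursive call removes 2 or 3 stones from nonnegative cells)
def towerMeasure (tower : List Int) : Nat := (tower.map Int.toNat).sum

-- A's fit_tower. The fuel argument only makes the recursion total (each
-- recursive call removes at least 2 stones, so towerMeasure+1 fuel suffices,
-- see fitF_irrel below); the for-loop with its early `return True` is the
-- short-circuiting `any` over the loop indices, one body is fitStep's three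
-- `if guard and fit_tower(new): return True` chances in order, with the
-- recursive call bound to f.
def fitStep (f : List Int → Bool) (tower : List Int) (s : Int) (i : Nat) : Bool :=
  if tower.getD i 0 == 0 then false
  else
    (if i < tower.length ∧ 2 ≤ tower.getD i 0 ∧ PySem.Int.mod s 3 = 2 then
        f (tower.take i ++ [tower.getD i 0 - 2] ++ tower.drop (i+1))
      else false)
    || (if i < tower.length ∧ 3 ≤ tower.getD i 0 then
        f (tower.take i ++ [tower.getD i 0 - 3] ++ tower.drop (i+1))
      else false)
    || (if i + 3 ≤ tower.length ∧ 1 ≤ tower.getD i 0 ∧ 1 ≤ tower.getD (i+1) 0 ∧ 1 ≤ tower.getD (i+2) 0 then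
        f (tower.take i ++ [tower.getD i 0 - 1, tower.getD (i+1) 0 - 1, tower.getD (i+2) 0 - 1]
            ++ tower.drop (i+3))
      else false)

def fitF : Nat → List Int → Bool → Bool
  | 0, _, _ => false
  | fuel+1, tower, pair_allowed =>
      if tower.sum == 0 then true
      else if PySem.Int.mod tower.sum 3 == 1 then false
      else if PySem.Int.mod tower.sum 3 == 2 && !pair_allowed then false
      else (List.range tower.length).any
        (fun i => fitStep (fun m => fitF fuel m true) tower tower.sum i)

def fit_tower (tower : List Int) (pair_allowed : Bool) : Bool :=
  fitF (towerMeasure tower + 1) tower pair_allowed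

-- iterate_sub_tower; the fuel argument only makes the Int-recursion total
-- (fuel = remaining+1 suffices, see iterate_eq_compsN below)
def iterate_sub_tower : Nat → List Int → Int → Int → List (List Int)
  | 0, _, _, _ => []
  | fuel+1, tower, remaining, n =>
      if remaining == 0 then [tower]
      else if (tower.length : Int) ≥ n then []
      else (PySem.List.pyRange 1 (min (remaining+1) 5) 1).foldl
            (fun ret j => ret ++ iterate_sub_tower fuel (tower ++ [j]) (remaining - j) n) []

-- one step of A's grouping loop over ret (append to existing key, else new key)
def groupFit (d : PySem.Dict Int (List (List Int))) (r : List Int) : PySem.Dict Int (List (List Int)) :=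
  if fit_tower r true then
    if d.contains r.sum then d.modify r.sum [] (fun l => l ++ [r])
    else d.insert r.sum [r]
  else d

def sub_tower (total : Int) : List (Int × List (List Int)) :=
  if PySem.Int.mod total 3 == 1 then []
  else
    (((PySem.List.pyRange 3 (total+1) 3).foldl
        (fun ret t => ret ++ iterate_sub_tower (t.toNat+1) [] t (10^12))
        (if PySem.Int.mod total 3 == 2 then
          (PySem.List.pyRange 2 (total+1) 3).foldl
            (fun ret t => ret ++ iterate_sub_tower (t.toNat+1) [] t (10^12)) []
         else [])).foldl groupFit PySem.Dict.empty).items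

-- ===== PORT B =====

-- B's moves(tower, s): the candidate successor towers, in loop order
def movesAt (tower : List Int) (s : Int) (i : Nat) : List (List Int) :=
  if tower.getD i 0 == 0 then []
  else
    (if i < tower.length ∧ 2 ≤ tower.getD i 0 ∧ PySem.Int.mod s 3 = 2 then
        [tower.take i ++ [tower.getD i 0 - 2] ++ tower.drop (i+1)] else [])
    ++ (if i < tower.length ∧ 3 ≤ tower.getD i 0 then
        [tower.take i ++ [tower.getD i 0 - 3] ++ tower.drop (i+1)] else [])
    ++ (if i + 3 ≤ tower.length ∧ 1 ≤ tower.getD i 0 ∧ 1 ≤ tower.getD (i+1) 0 ∧ 1 ≤ tower.getD (i+2) 0 then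
        [tower.take i ++ [tower.getD i 0 - 1, tower.getD (i+1) 0 - 1, tower.getD (i+2) 0 - 1]
            ++ tower.drop (i+3)] else [])

def movesOf (tower : List Int) (s : Int) : List (List Int) :=
  (List.range tower.length).flatMap (movesAt tower s)

-- B's memoized fit; tryMoves is `any(fit(m) for m in moves)` threading the
-- memo, with the recursive call bound to f; the fuel argument only makes the
-- recursion total, exactly as in fitF above.
def tryMoves (f : List Int → PySem.Dict (List Int) Bool → Bool × PySem.Dict (List Int) Bool) :
    List (List Int) → PySem.Dict (List Int) Bool → Bool × PySem.Dict (List Int) Bool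
  | [], memo => (false, memo)
  | m :: rest, memo =>
      let q := f m memo
      if q.1 then (true, q.2) else tryMoves f rest q.2

def fitMemoF : Nat → List Int → PySem.Dict (List Int) Bool →
    Bool × PySem.Dict (List Int) Bool
  | 0, _, memo => (false, memo)
  | fuel+1, tower, memo =>
      match memo.get? tower with
      | some r => (r, memo)
      | none =>
          if tower.sum == 0 then (true, memo.insert tower true)
          else if PySem.Int.mod tower.sum 3 == 1 then (false, memo.insert tower false)
          else
            let p := tryMoves (fun m memo => fitMemoF fuel m memo) (movesOf tower tower.sum) memo
            (p.1, p.2.insert tower p.1)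

def fitMemo (tower : List Int) (memo : PySem.Dict (List Int) Bool) :
    Bool × PySem.Dict (List Int) Bool :=
  fitMemoF (towerMeasure tower + 1) tower memo

-- B's `[c for c in comps[t] if fit(c)]`, threading the memo left to right
def filterFit (cs : List (List Int)) (memo : PySem.Dict (List Int) Bool) :
    List (List Int) × PySem.Dict (List Int) Bool :=
  match cs with
  | [] => ([], memo)
  | c :: rest =>
      let q := fitMemo c memo
      let p := filterFit rest q.2
      (if q.1 then c :: p.1 else p.1, p.2)

-- B's bottom-up table: comps[t] = compositions of t into parts 1..4, lex order
def compsTable (total : Int) : List (List (List Int)) :=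
  (PySem.List.pyRange 1 (total + 1) 1).foldl
    (fun comps t =>
      comps ++ [(PySem.List.pyRange 1 (min t 4 + 1) 1).foldl
        (fun row j => row ++ (PySem.List.pyGetD comps (t - j) []).map (fun c => j :: c)) []])
    [[[]]]

-- B's output dict is built with strictly increasing fresh keys, so it is the
-- appended association list directly
def sub_tower_alt (total : Int) : List (Int × List (List Int)) :=
  if PySem.Int.mod total 3 == 1 then []
  else
    (((if PySem.Int.mod total 3 == 2 then PySem.List.pyRange 2 (total + 1) 3 else [])
        ++ PySem.List.pyRange 3 (total + 1) 3).foldl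
      (fun st t =>
        let q := filterFit (PySem.List.pyGetD (compsTable total) t []) st.2
        (if q.1.isEmpty then st.1 else st.1 ++ [(t, q.1)], q.2))
      ([], PySem.Dict.empty)).1

-- ===== PRECONDITION & SPEC =====
def Spec_sub_tower (total : Int) (out : List (Int × List (List Int))) : Prop := out = sub_tower_alt total
instance (total : Int) (out : List (Int × List (List Int))) : Decidable (Spec_sub_tower total out) := by unfold Spec_sub_tower; infer_instance

-- ===== CLAIM (what is proved, stated in full; the proofs are below) =====
def Claim_equal_sub_tower : Prop := ∀ (total : Int), Dom_sub_tower total → Spec_sub_tower total (sub_tower total)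

-- ===== LEMMAS AND PROOFS =====

lemma towerMeasure_sub (tower : List Int) (i : Nat) (c : Int) (hi : i < tower.length)
    (hc : 0 < c) (hle : c ≤ tower.getD i 0) :
    towerMeasure (tower.take i ++ (tower.getD i 0 - c) :: tower.drop (i+1)) < towerMeasure tower := by
  conv_rhs => rw [← List.take_append_drop i tower]
  rw [List.drop_eq_getElem_cons hi]
  rw [List.getD_eq_getElem tower 0 hi] at hle ⊢
  simp only [towerMeasure, List.map_append, List.sum_append, List.map_cons, List.sum_cons]
  omega

lemma towerMeasure_pung (tower : List Int) (i : Nat) (hi : i + 3 ≤ tower.length)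
    (h0 : 1 ≤ tower.getD i 0) (h1 : 1 ≤ tower.getD (i+1) 0) (h2 : 1 ≤ tower.getD (i+2) 0) :
    towerMeasure (tower.take i ++ (tower.getD i 0 - 1) :: (tower.getD (i+1) 0 - 1) :: (tower.getD (i+2) 0 - 1)
        :: tower.drop (i+3)) < towerMeasure tower := by
  have e0 : i < tower.length := by omega
  have e1 : i+1 < tower.length := by omega
  have e2 : i+2 < tower.length := by omega
  have h12 : i + 1 + 1 = i + 2 := by omega
  have h23 : i + 2 + 1 = i + 3 := by omega
  conv_rhs => rw [← List.take_append_drop i tower]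
  rw [List.drop_eq_getElem_cons e0, List.drop_eq_getElem_cons e1, h12, List.drop_eq_getElem_cons e2, h23]
  rw [List.getD_eq_getElem tower 0 e0] at h0 ⊢
  rw [List.getD_eq_getElem tower 0 e1] at h1 ⊢
  rw [List.getD_eq_getElem tower 0 e2] at h2 ⊢
  simp only [towerMeasure, List.map_append, List.sum_append, List.map_cons, List.sum_cons]
  omega

lemma towerMeasure_moves (tower : List Int) (s : Int) (m : List Int)
    (hm : m ∈ movesOf tower s) : towerMeasure m < towerMeasure tower := by
  rcases List.mem_flatMap.1 hm with ⟨i, hi, hmi⟩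
  unfold movesAt at hmi
  split at hmi
  · simp at hmi
  · simp only [List.mem_append] at hmi
    rcases hmi with (hmi | hmi) | hmi <;> split at hmi <;> simp at hmi <;> subst hmi
    · exact towerMeasure_sub tower i 2 (by tauto) (by omega) (by tauto)
    · exact towerMeasure_sub tower i 3 (by tauto) (by omega) (by tauto)
    · exact towerMeasure_pung tower i (by tauto) (by tauto) (by tauto) (by tauto)


-- the compositions of n into parts 1..4, in lexicographic order (proof-side spec)
def compsN (n : Nat) : List (List Int) :=
  if n = 0 then [[]]
  else (List.range (min n 4)).flatMap
    (fun k => (compsN (n - (k+1))).map (fun c => ((k+1 : Nat) : Int) :: c))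
termination_by n
decreasing_by omega

lemma compsN_sum : ∀ n, ∀ c ∈ compsN n, c.sum = (n : Int) := by
  intro n
  induction n using Nat.strong_induction_on with
  | _ n ih =>
    intro c hc
    rw [compsN] at hc
    split at hc
    · rename_i h0; simp only [List.mem_singleton] at hc; subst hc; simp [h0]
    · rcases List.mem_flatMap.1 hc with ⟨k, hk, hc⟩
      rcases List.mem_map.1 hc with ⟨c', hc', rfl⟩
      have hk4 : k < min n 4 := List.mem_range.1 hk
      have hsum := ih (n - (k+1)) (by omega) c' hc'
      rw [List.sum_cons, hsum]
      omega

lemma compsN_eq_pyRange (n : Nat) (hn : n ≠ 0) :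
    compsN n = (PySem.List.pyRange 1 (min (n : Int) 4 + 1) 1).flatMap
      (fun j => (compsN (n - j.toNat)).map (fun c => j :: c)) := by
  rw [PySem.List.pyRange_one, List.flatMap_map]
  have hmin : (min (n : Int) 4 + 1 - 1).toNat = min n 4 := by omega
  rw [hmin]
  conv_lhs => rw [compsN, if_neg hn]
  refine List.flatMap_congr fun k hk => ?_
  have h1 : ((1 : Int) + k).toNat = k + 1 := by omega
  have h2 : ((k + 1 : Nat) : Int) = 1 + (k : Int) := by push_cast; ring
  rw [h1, h2]

lemma iterate_eq_compsN : ∀ (fuel : Nat) (r : Int) (pre : List Int), 0 ≤ r → r.toNat < fuel →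
    (pre.length : Int) + r < 10^12 →
    iterate_sub_tower fuel pre r (10^12) = (compsN r.toNat).map (fun c => pre ++ c) := by
  intro fuel
  induction fuel with
  | zero => intro r pre h0 hf hb; omega
  | succ f ih =>
    intro r pre h0 hf hb
    have hpre : (0 : Int) ≤ (pre.length : Int) := by positivity
    by_cases hr : r = 0
    · subst hr; simp [iterate_sub_tower, compsN]
    · have hr1 : 1 ≤ r := by omega
      simp only [iterate_sub_tower]
      rw [if_neg (by simpa using hr), if_neg (by omega)]
      rw [PySem.List.foldl_append_eq_flatMap, List.nil_append, PySem.List.pyRange_one,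
        List.flatMap_map]
      have hmin : (min (r + 1) 5 - 1).toNat = min r.toNat 4 := by omega
      rw [hmin]
      conv_rhs => rw [compsN, if_neg (by omega), List.map_flatMap]
      refine List.flatMap_congr fun k hk => ?_
      have hk4 : k < min r.toNat 4 := List.mem_range.1 hk
      rw [ih (r - (1 + k)) (pre ++ [1 + (k : Int)]) (by omega) (by omega)
        (by simp; omega)]
      rw [List.map_map]
      have he : (r - (1 + (k : Int))).toNat = r.toNat - (k + 1) := by omega
      rw [he]
      refine List.map_congr_left fun c _ => ?_
      simp only [Function.comp_apply, List.append_assoc, List.singleton_append]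
      congr 2
      push_cast; ring

lemma compsTable_eq (total : Int) :
    compsTable total = (List.range (total.toNat + 1)).map compsN := by
  unfold compsTable
  rw [PySem.List.pyRange_one, add_sub_cancel_right, List.foldl_map]
  suffices h : ∀ m : Nat,
      (List.range m).foldl
        (fun comps (k : Nat) =>
          comps ++ [(PySem.List.pyRange 1 (min (1 + (k : Int)) 4 + 1) 1).foldl
            (fun row j => row ++ (PySem.List.pyGetD comps ((1 + (k : Int)) - j) []).map (fun c => j :: c)) []])
        [[[]]] = (List.range (m + 1)).map compsN by
    exact h total.toNat
  intro m
  induction m with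
  | zero => simp [compsN]
  | succ m ihm =>
    rw [List.range_succ, List.foldl_append, ihm, List.foldl_cons, List.foldl_nil]
    rw [List.range_succ (n := m + 1), List.map_append, List.map_singleton]
    congr 1
    rw [PySem.List.foldl_append_eq_flatMap, List.nil_append]
    rw [compsN_eq_pyRange (m + 1) (by omega)]
    have hc : ((m + 1 : Nat) : Int) = 1 + (m : Int) := by push_cast; ring
    rw [hc]
    congr 1
    refine (List.flatMap_congr fun j hj => ?_).symm
    rw [PySem.List.mem_pyRange_one] at hj
    have hj1 : 1 ≤ j := hj.1
    have hj2 : j < min (1 + (m : Int)) 4 + 1 := hj.2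
    rw [PySem.List.pyGetD_of_nonneg _ _ (by omega)]
    rw [PySem.List.getD_map_range compsN (m + 1) (1 + (m : Int) - j).toNat [] (by omega)]
    congr 2
    omega

-- characterization of A's fit_tower by the move list
lemma fitStep_eq_any (f : List Int → Bool) (tower : List Int) (s : Int) (i : Nat) :
    fitStep f tower s i = (movesAt tower s i).any f := by
  unfold fitStep movesAt
  split_ifs <;> simp [Bool.or_assoc]

lemma fitF_succ_any (fuel : Nat) (tower : List Int) :
    fitF (fuel+1) tower true =
      (if tower.sum == 0 then true
       else if PySem.Int.mod tower.sum 3 == 1 then false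
       else (movesOf tower tower.sum).any (fun m => fitF fuel m true)) := by
  rw [fitF]
  simp only [Bool.not_true, Bool.and_false, Bool.false_eq_true, if_false]
  by_cases h0 : tower.sum = 0
  · simp [h0]
  · by_cases h1 : tower.sum % 3 = 1
    · simp [h0, h1]
    · simp only [movesOf, List.any_flatMap]
      have := fun i => fitStep_eq_any (fun m => fitF fuel m true) tower tower.sum i
      simp [h0, h1, this]

-- with enough fuel, fitF does not depend on the exact fuel
lemma fitF_irrel : ∀ (f1 : Nat), ∀ (tower : List Int) (f2 : Nat),
    towerMeasure tower < f1 → towerMeasure tower < f2 →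
    fitF f1 tower true = fitF f2 tower true := by
  intro f1
  induction f1 with
  | zero => intro tower f2 h1; omega
  | succ a ih =>
    intro tower f2 h1 h2
    cases f2 with
    | zero => omega
    | succ b =>
      rw [fitF_succ_any a, fitF_succ_any b]
      by_cases h0 : tower.sum = 0
      · simp [h0]
      · by_cases hm : tower.sum % 3 = 1
        · simp [h0, hm]
        · have hb0 : (tower.sum == 0) = false := by simpa using h0
          have hb1 : (PySem.Int.mod tower.sum 3 == 1) = false := by
            rw [PySem.Int.mod_eq_emod_of_pos (by norm_num)]; simpa using hm
          simp only [hb0, hb1, Bool.false_eq_true, if_false]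
          refine PySem.List.any_congr_mem fun m hm => ?_
          have hlt := towerMeasure_moves tower tower.sum m hm
          exact ih m b (by omega) (by omega)

lemma fit_eq (tower : List Int) :
    fit_tower tower true =
      (if tower.sum == 0 then true
       else if PySem.Int.mod tower.sum 3 == 1 then false
       else (movesOf tower tower.sum).any (fun m => fit_tower m true)) := by
  rw [fit_tower, fitF_succ_any]
  by_cases h0 : tower.sum = 0
  · simp [h0]
  · by_cases hm : tower.sum % 3 = 1
    · simp [h0, hm]
    · have hb0 : (tower.sum == 0) = false := by simpa using h0
      have hb1 : (PySem.Int.mod tower.sum 3 == 1) = false := by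
        rw [PySem.Int.mod_eq_emod_of_pos (by norm_num)]; simpa using hm
      simp only [hb0, hb1, Bool.false_eq_true, if_false]
      refine PySem.List.any_congr_mem fun m hmem => ?_
      have hlt := towerMeasure_moves tower tower.sum m hmem
      rw [fit_tower]
      exact fitF_irrel (towerMeasure tower) m (towerMeasure m + 1) (by omega) (by omega)

-- memo soundness
def ValidMemo (memo : PySem.Dict (List Int) Bool) : Prop :=
  ∀ k v, memo.get? k = some v → v = fit_tower k true

lemma fitMemoF_go : ∀ (fuel : Nat) (tower : List Int) (memo : PySem.Dict (List Int) Bool),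
    towerMeasure tower < fuel → ValidMemo memo →
    (fitMemoF fuel tower memo).1 = fit_tower tower true ∧
      ValidMemo (fitMemoF fuel tower memo).2 := by
  intro fuel
  induction fuel with
  | zero => intro tower memo h; omega
  | succ N ih =>
    intro tower memo hN hv
    rw [fitMemoF]
    cases hget : memo.get? tower with
    | some r => exact ⟨(hv _ _ hget).symm ▸ rfl, hv⟩
    | none =>
      have hvalid_ins : ∀ (m : PySem.Dict (List Int) Bool) (b : Bool), ValidMemo m →
          b = fit_tower tower true → ValidMemo (m.insert tower b) := by
        intro m b hm hb k v hkv
        rw [PySem.Dict.get?_insert] at hkv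
        split at hkv
        · rename_i hk; cases hkv; exact hk ▸ hb
        · exact hm _ _ hkv
      by_cases h0 : tower.sum = 0
      · have hfit : fit_tower tower true = true := by rw [fit_eq]; simp [h0]
        simp only [h0]
        refine ⟨by simpa using hfit.symm, ?_⟩
        simpa [h0] using hvalid_ins memo true hv hfit.symm
      · by_cases h1 : tower.sum % 3 = 1
        · have hfit : fit_tower tower true = false := by rw [fit_eq]; simp [h0, h1]
          refine ⟨by simpa [h0, h1] using hfit.symm, ?_⟩
          simpa [h0, h1] using hvalid_ins memo false hv hfit.symm
        · have hTry : ∀ (ms : List (List Int)),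
              (∀ m ∈ ms, towerMeasure m < towerMeasure tower) →
              ∀ (memo : PySem.Dict (List Int) Bool), ValidMemo memo →
              (tryMoves (fun m memo => fitMemoF N m memo) ms memo).1
                  = ms.any (fun m => fit_tower m true) ∧
                ValidMemo (tryMoves (fun m memo => fitMemoF N m memo) ms memo).2 := by
            intro ms
            induction ms with
            | nil => intro _ memo hm; rw [tryMoves]; simpa using hm
            | cons m rest ihm =>
              intro hms memo hm
              rw [tryMoves]
              have hmlt : towerMeasure m < N := by
                have := hms m (List.mem_cons_self ..)
                omega
              obtain ⟨hq1, hq2⟩ := ih m memo hmlt hm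
              by_cases hq : (fitMemoF N m memo).1 = true
              · simp only [hq]
                refine ⟨?_, hq2⟩
                simp [List.any_cons, ← hq1, hq]
              · rw [if_neg (by simpa using hq)]
                obtain ⟨hr1, hr2⟩ := ihm (fun x hx => hms x (List.mem_cons_of_mem _ hx))
                  (fitMemoF N m memo).2 hq2
                refine ⟨?_, hr2⟩
                rw [hr1, List.any_cons, ← hq1]
                simp [Bool.eq_false_iff.2 hq]
          have hfit : fit_tower tower true
              = (movesOf tower tower.sum).any (fun m => fit_tower m true) := by
            rw [fit_eq]; simp [h0, h1]
          obtain ⟨ht1, ht2⟩ := hTry (movesOf tower tower.sum)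
            (fun m hm => towerMeasure_moves tower tower.sum m hm) memo hv
          have hres : (tryMoves (fun m memo => fitMemoF N m memo)
              (movesOf tower tower.sum) memo).1 = fit_tower tower true := by
            rw [ht1, hfit]
          refine ⟨by simpa [h0, h1] using hres, ?_⟩
          simpa [h0, h1] using hvalid_ins _ _ ht2 hres

lemma fitMemo_spec (tower : List Int) (memo : PySem.Dict (List Int) Bool) (h : ValidMemo memo) :
    (fitMemo tower memo).1 = fit_tower tower true ∧ ValidMemo (fitMemo tower memo).2 :=
  fitMemoF_go (towerMeasure tower + 1) tower memo (Nat.lt_succ_self _) h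

lemma filterFit_spec (cs : List (List Int)) (memo : PySem.Dict (List Int) Bool) (h : ValidMemo memo) :
    (filterFit cs memo).1 = cs.filter (fun c => fit_tower c true) ∧
      ValidMemo (filterFit cs memo).2 := by
  induction cs generalizing memo with
  | nil => exact ⟨rfl, h⟩
  | cons c rest ih =>
    rw [filterFit]
    obtain ⟨h1, h2⟩ := fitMemo_spec c memo h
    obtain ⟨h3, h4⟩ := ih (fitMemo c memo).2 h2
    refine ⟨?_, h4⟩
    simp [h1, h3, List.filter_cons]

-- the two grouping passes
lemma groupFit_eq_modify :
    groupFit = fun d r => if fit_tower r true then d.modify r.sum [] (fun l => l ++ [r]) else d := by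
  funext d r
  unfold groupFit
  split_ifs with hf hc
  · rfl
  · rw [PySem.Dict.modify,
      PySem.Dict.getD_of_not_contains d [] (by simpa using hc), List.nil_append]
  · rfl

lemma set_ofList_const (t : Int) : ∀ (l : List Int), (∀ x ∈ l, x = t) →
    PySem.Set.ofList l = if l.isEmpty then [] else [t] := by
  intro l
  induction l with
  | nil => simp [PySem.Set.ofList]
  | cons x xs ih =>
    intro h
    have hx : x = t := h x (List.mem_cons_self ..)
    have hxs := ih (fun y hy => h y (List.mem_cons_of_mem _ hy))
    rw [PySem.Set.ofList_cons, hxs, hx]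
    by_cases he : xs.isEmpty <;> simp [he, PySem.Set.discard]

lemma ofList_sums_eq_filter (F : Int → List (List Int)) :
    ∀ (ts : List Int), ts.Nodup → (∀ t ∈ ts, ∀ r ∈ F t, r.sum = t) →
    PySem.Set.ofList ((ts.flatMap F).map List.sum) = ts.filter (fun t => !(F t).isEmpty) := by
  intro ts
  induction ts with
  | nil => simp [PySem.Set.ofList]
  | cons t ts' ih =>
    intro hnd hsum
    rw [List.nodup_cons] at hnd
    have ih' := ih hnd.2 (fun u hu => hsum u (List.mem_cons_of_mem _ hu))
    rw [List.flatMap_cons, List.map_append, PySem.Set.ofList_append]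
    have hconst : ∀ x ∈ (F t).map List.sum, x = t := by
      intro x hx
      rcases List.mem_map.1 hx with ⟨r, hr, rfl⟩
      exact hsum t (List.mem_cons_self ..) r hr
    rw [set_ofList_const t _ hconst]
    by_cases hF : (F t).isEmpty
    · rw [if_pos (by simpa using hF), PySem.Set.update_nil_left, ih', List.filter_cons]
      simp [hF]
    · rw [if_neg (by simpa using hF), PySem.Set.update_eq_append_filter, ih']
      have hfil : (ts'.filter (fun u => !(F u).isEmpty)).filter
          (fun y => !PySem.Set.contains [t] y) = ts'.filter (fun u => !(F u).isEmpty) := by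
        rw [List.filter_eq_self]
        intro u hu
        have : u ∈ ts' := List.mem_of_mem_filter hu
        have : u ≠ t := fun he => hnd.1 (he ▸ this)
        simp [PySem.Set.contains, this]
      rw [hfil, List.filter_cons]
      simp [hF]

lemma flatMap_filter_sum (F : Int → List (List Int)) :
    ∀ (ts : List Int), ts.Nodup → (∀ t ∈ ts, ∀ r ∈ F t, r.sum = t) →
    ∀ t ∈ ts, (ts.flatMap F).filter (fun r => r.sum == t) = F t := by
  intro ts
  induction ts with
  | nil => simp
  | cons t' ts' ih =>
    intro hnd hsum t ht
    rw [List.nodup_cons] at hnd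
    have hFt' : ∀ r ∈ F t', r.sum = t' := hsum t' (List.mem_cons_self ..)
    rw [List.flatMap_cons, List.filter_append]
    rcases List.mem_cons.1 ht with rfl | ht'
    · have h1 : (F t).filter (fun r => r.sum == t) = F t := by
        rw [List.filter_eq_self]
        intro r hr; simp [hFt' r hr]
      have h2 : (ts'.flatMap F).filter (fun r => r.sum == t) = [] := by
        rw [List.filter_eq_nil_iff]
        intro r hr
        rcases List.mem_flatMap.1 hr with ⟨u, hu, hru⟩
        have hru' := hsum u (List.mem_cons_of_mem _ hu) r hru
        have : u ≠ t := fun he => hnd.1 (he ▸ hu)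
        simp [hru', this]
      rw [h1, h2, List.append_nil]
    · have h1 : (F t').filter (fun r => r.sum == t) = [] := by
        rw [List.filter_eq_nil_iff]
        intro r hr
        have : t' ≠ t := fun he => hnd.1 (he ▸ ht')
        simp [hFt' r hr, this]
      rw [h1, List.nil_append]
      exact ih hnd.2 (fun u hu => hsum u (List.mem_cons_of_mem _ hu)) t ht'

-- A's grouping fold, in closed form: keys in first-apparition order, values grouped
lemma groupFold_items (rs : List (List Int)) :
    (rs.foldl groupFit PySem.Dict.empty).items =
      (PySem.Set.ofList ((rs.filter (fun r => fit_tower r true)).map List.sum)).map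
        (fun k => (k, (rs.filter (fun r => fit_tower r true)).filter (fun r => r.sum == k))) := by
  rw [groupFit_eq_modify, PySem.List.foldl_if_eq_foldl_filter]
  have hpair : (((rs.filter (fun r => fit_tower r true)).map
          (fun r : List Int => ((r.sum : Int), r))).foldl
        (fun d p => d.modify p.1 [] fun x => x ++ [p.2]) PySem.Dict.empty)
      = ((rs.filter (fun r => fit_tower r true)).foldl
        (fun d r => d.modify r.sum [] fun l => l ++ [r]) PySem.Dict.empty) := List.foldl_map
  rw [← hpair]
  set L : List (Int × List Int) := (rs.filter (fun r => fit_tower r true)).map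
    (fun r : List Int => ((r.sum : Int), r)) with hL
  set D := L.foldl (fun d p => d.modify p.1 [] fun x => x ++ [p.2]) PySem.Dict.empty with hD
  have hnd : D.keys.Nodup :=
    PySem.Dict.nodup_keys_foldl_modify_key L (fun p => p.1) [] (fun _ p x => x ++ [p.2])
      PySem.Dict.empty (by simp [PySem.Dict.keys_empty])
  rw [PySem.Dict.items_eq_map_keys D hnd []]
  have hkeys : D.keys = PySem.Set.ofList ((rs.filter (fun r => fit_tower r true)).map List.sum) := by
    have h0 : D.keys = PySem.Set.update
        (PySem.Dict.empty (κ := Int) (ν := List (List Int))).keys (L.map (fun p => p.1)) :=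
      PySem.Dict.keys_foldl_modify_key L (fun p => p.1) [] (fun _ p x => x ++ [p.2])
        PySem.Dict.empty
    rw [h0, PySem.Dict.keys_empty, PySem.Set.update_nil_left, hL, List.map_map]
    rfl
  rw [hkeys]
  refine List.map_congr_left fun k _ => ?_
  have hget : D.getD k [] = (rs.filter (fun r => fit_tower r true)).filter
      (fun r => r.sum == k) := by
    have h0 : D.getD k [] = (PySem.Dict.empty (κ := Int) (ν := List (List Int))).getD k []
        ++ (L.filter (fun p => p.1 == k)).map (fun p => p.2) :=
      PySem.Dict.getD_foldl_modify_append L PySem.Dict.empty k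
    rw [h0, PySem.Dict.getD_empty, List.nil_append, hL, List.filter_map, List.map_map]
    simp [Function.comp_def]
  rw [hget]

-- B's output fold with the memo threaded out
lemma altFold (cs : List (List (List Int))) (ts : List Int) :
    ∀ (out : List (Int × List (List Int))) (memo : PySem.Dict (List Int) Bool), ValidMemo memo →
    (ts.foldl (fun st t =>
        let q := filterFit (PySem.List.pyGetD cs t []) st.2
        (if q.1.isEmpty then st.1 else st.1 ++ [(t, q.1)], q.2)) (out, memo)).1
    = ts.foldl (fun out t =>
        if ((PySem.List.pyGetD cs t []).filter (fun c => fit_tower c true)).isEmpty then out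
        else out ++ [(t, (PySem.List.pyGetD cs t []).filter (fun c => fit_tower c true))]) out := by
  induction ts with
  | nil => intro out memo _; rfl
  | cons t ts' ih =>
    intro out memo hv
    rw [List.foldl_cons, List.foldl_cons]
    obtain ⟨h1, h2⟩ := filterFit_spec (PySem.List.pyGetD cs t []) memo hv
    simp only [h1]
    exact ih _ _ h2

-- a fold that appends one labelled group per bucket is a filter-map
lemma foldPure (F : Int → List (List Int)) (ts : List Int) (out : List (Int × List (List Int))) :
    ts.foldl (fun out t => if (F t).isEmpty then out else out ++ [(t, F t)]) out
      = out ++ (ts.filter (fun t => !(F t).isEmpty)).map (fun t => (t, F t)) := by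
  have hf : (fun (out : List (Int × List (List Int))) t =>
        if (F t).isEmpty then out else out ++ [(t, F t)])
      = fun out t => if !(F t).isEmpty then out ++ [(t, F t)] else out := by
    funext out t
    cases h : (F t).isEmpty <;> simp
  rw [hf, PySem.List.foldl_append_if]

-- both programs, reduced over a common duplicate-free list of bucket sums
lemma main_core (total : Int) (hB : total ≤ 2147483648) (ts : List Int)
    (hts_mem : ∀ t ∈ ts, 2 ≤ t ∧ t ≤ total) (hts_nd : ts.Nodup) :
    ((ts.flatMap (fun t => iterate_sub_tower (t.toNat+1) [] t (10^12))).foldl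
        groupFit PySem.Dict.empty).items
    = (ts.foldl
        (fun st t =>
          let q := filterFit (PySem.List.pyGetD (compsTable total) t []) st.2
          (if q.1.isEmpty then st.1 else st.1 ++ [(t, q.1)], q.2))
        ([], PySem.Dict.empty)).1 := by
  have hF : ∀ t ∈ ts, ∀ r ∈ (compsN t.toNat).filter (fun c => fit_tower c true), r.sum = t := by
    intro t ht r hr
    have h2 := (hts_mem t ht).1
    have := compsN_sum t.toNat r (List.mem_of_mem_filter hr)
    omega
  -- A's side
  have hg : ts.flatMap (fun t => iterate_sub_tower (t.toNat+1) [] t (10^12))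
      = ts.flatMap (fun t => compsN t.toNat) := by
    refine List.flatMap_congr fun t ht => ?_
    obtain ⟨h2, hT⟩ := hts_mem t ht
    rw [iterate_eq_compsN (t.toNat + 1) t [] (by omega) (by omega) (by simp; omega)]
    simp
  rw [hg, groupFold_items, List.filter_flatMap,
    ofList_sums_eq_filter (fun t => (compsN t.toNat).filter (fun c => fit_tower c true)) ts hts_nd hF]
  have hA : ∀ k ∈ ts.filter (fun t => !((compsN t.toNat).filter (fun c => fit_tower c true)).isEmpty),
      (ts.flatMap (fun t => (compsN t.toNat).filter (fun c => fit_tower c true))).filter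
          (fun r => r.sum == k)
        = (compsN k.toNat).filter (fun c => fit_tower c true) := by
    intro k hk
    exact flatMap_filter_sum _ ts hts_nd hF k (List.mem_of_mem_filter hk)
  -- B's side
  have hvalid : ValidMemo PySem.Dict.empty := by
    intro k v hkv
    simp [PySem.Dict.get?_empty] at hkv
  rw [altFold (compsTable total) ts [] PySem.Dict.empty hvalid]
  have hget : ∀ t ∈ ts, PySem.List.pyGetD (compsTable total) t [] = compsN t.toNat := by
    intro t ht
    obtain ⟨h2, hT⟩ := hts_mem t ht
    rw [compsTable_eq, PySem.List.pyGetD_of_nonneg _ _ (by omega),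
      PySem.List.getD_map_range compsN (total.toNat + 1) t.toNat [] (by omega)]
  have hstep : ts.foldl (fun out t =>
        if ((PySem.List.pyGetD (compsTable total) t []).filter (fun c => fit_tower c true)).isEmpty
        then out
        else out ++ [(t, (PySem.List.pyGetD (compsTable total) t []).filter
          (fun c => fit_tower c true))]) []
      = ts.foldl (fun out t =>
        if ((compsN t.toNat).filter (fun c => fit_tower c true)).isEmpty then out
        else out ++ [(t, (compsN t.toNat).filter (fun c => fit_tower c true))]) [] := by
    refine PySem.List.foldl_congr_mem ts _ _ [] (fun acc t ht => ?_)
    rw [hget t ht]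
  rw [hstep, foldPure, List.nil_append]
  refine List.map_congr_left fun k hk => ?_
  rw [hA k hk]

lemma pyRange3_nodup (a b : Int) : (PySem.List.pyRange a b 3).Nodup := by
  rw [PySem.List.pyRange_of_pos a b (by norm_num)]
  exact List.Nodup.map (fun x y hxy => by omega) List.nodup_range

lemma pyRange3_mem (a b x : Int) (h : x ∈ PySem.List.pyRange a b 3) :
    a ≤ x ∧ x < b ∧ 3 ∣ x - a :=
  (PySem.List.mem_pyRange_iff_of_pos (by norm_num) x).1 h

-- ===== VERDICT (by name: the statement is the Claim_ definition above) =====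
theorem sub_tower_spec : Claim_equal_sub_tower := by
  intro total hdom
  unfold Spec_sub_tower
  have hB : total ≤ 2147483648 := by
    unfold Dom_sub_tower pvDomInt at hdom
    simp only [decide_eq_true_eq] at hdom
    exact hdom.2
  by_cases hm1 : PySem.Int.mod total 3 = 1
  · have h1 : (PySem.Int.mod total 3 == 1) = true := by simpa using hm1
    rw [sub_tower, sub_tower_alt, if_pos h1, if_pos h1]
  · have h1 : ¬ ((PySem.Int.mod total 3 == 1) = true) := by simpa using hm1
    rw [sub_tower, sub_tower_alt, if_neg h1, if_neg h1]
    by_cases hm2 : PySem.Int.mod total 3 = 2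
    · have h2 : (PySem.Int.mod total 3 == 2) = true := by simpa using hm2
      rw [if_pos h2, if_pos h2]
      rw [PySem.List.foldl_append_eq_flatMap, PySem.List.foldl_append_eq_flatMap,
        List.nil_append, ← List.flatMap_append]
      refine main_core total hB _ ?_ ?_
      · intro t ht
        rcases List.mem_append.1 ht with h | h
        · have := pyRange3_mem _ _ _ h; omega
        · have := pyRange3_mem _ _ _ h; omega
      · rw [List.nodup_append]
        refine ⟨pyRange3_nodup _ _, pyRange3_nodup _ _, ?_⟩
        intro x hx y hy hxy
        subst hxy
        have h2 := (pyRange3_mem _ _ _ hx).2.2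
        have h3 := (pyRange3_mem _ _ _ hy).2.2
        omega
    · have h2 : ¬ ((PySem.Int.mod total 3 == 2) = true) := by simpa using hm2
      rw [if_neg h2, if_neg h2]
      rw [PySem.List.foldl_append_eq_flatMap, List.nil_append, List.nil_append]
      refine main_core total hB _ ?_ (pyRange3_nodup _ _)
      intro t ht
      have := pyRange3_mem _ _ _ ht; omega
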